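-- pv_equiv track=rewrite | github.com/ChrisMaherLab/DANSR | src/update_boundary_2.py | getNextPosition
-- ===== SOURCE A (Python) =====
-- def getNextPosition(p,sigar):
--     if 'S' in sigar or 'H' in sigar: ##### not supporting clipped reads
--         return -1
--     else:
--         s=''
--         nums=[]
--         num_str=''
--         for x in range(len(sigar)):
--             if sigar[x] in {'M','I','D','S','H'}:
--                 s=s+sigar[x]
--                 nums.append(int(num_str))
--                 num_str=''
--             else:
--                 num_str=num_str+sigar[x]
--         totalLen=0
--         for x in range(len(s)):
--             if s[x]=='M' or s[x]=='D':
--                 totalLen=totalLen+nums[x]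
--         return p+totalLen-1
-- ===== SOURCE B (Python) =====
-- def getNextPosition(p, sigar):
--     if 'S' in sigar or 'H' in sigar:  # not supporting clipped reads
--         return -1
--     totalLen = 0
--     num_str = ''
--     for c in sigar:
--         if c in {'M', 'I', 'D', 'S', 'H'}:
--             v = int(num_str)  # same ValueError as A on an empty/bad buffer
--             if c == 'M' or c == 'D':
--                 totalLen += v
--             num_str = ''
--         else:
--             num_str += c
--     return p + totalLen - 1
-- ===== Notes on version B (the rewrite author's own statement) =====
-- stated objective: simpler
-- what changed: B replaces A's two-pass scheme (build op string s and list nums, then a second indexed loop summing nums[x] for M/D ops) by a single pass that keeps only a digit buffer and a running total, adding int(buffer) directly when an M/D op char is seen.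
import Mathlib
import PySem

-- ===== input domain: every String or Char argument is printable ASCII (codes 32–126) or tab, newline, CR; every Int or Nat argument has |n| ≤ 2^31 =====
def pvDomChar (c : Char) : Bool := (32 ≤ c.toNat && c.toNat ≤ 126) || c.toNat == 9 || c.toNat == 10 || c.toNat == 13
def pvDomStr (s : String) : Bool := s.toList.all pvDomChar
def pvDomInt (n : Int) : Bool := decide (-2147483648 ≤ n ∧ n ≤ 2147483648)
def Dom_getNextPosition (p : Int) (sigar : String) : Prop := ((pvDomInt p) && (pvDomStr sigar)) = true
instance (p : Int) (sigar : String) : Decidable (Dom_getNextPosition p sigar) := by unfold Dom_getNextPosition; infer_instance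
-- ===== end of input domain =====

-- B merges A's two passes into one pass keeping only a digit buffer and a running total (objective: simpler).

-- ===== PORT A =====
-- A's first loop: state (s, nums, num_str); int(num_str) raises ValueError on a bad
-- buffer — Pre_ excludes that, here `getD 0` stands for the unreachable-raise case.
def stepA (acc : List Char × List Int × List Char) (c : Char) : List Char × List Int × List Char :=
  if c ∈ ['M', 'I', 'D', 'S', 'H'] then
    (acc.1 ++ [c], acc.2.1 ++ [(PySem.Int.ofChars? acc.2.2).getD 0], [])
  else
    (acc.1, acc.2.1, acc.2.2 ++ [c])

-- A's second loop: 'for x in range(len(s)): if s[x] in MD: totalLen += nums[x]'.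
def secondLoopA (s : List Char) (nums : List Int) : Int :=
  (List.range s.length).foldl
    (fun t x => if s.getD x ' ' = 'M' ∨ s.getD x ' ' = 'D' then t + nums.getD x 0 else t) 0

def getNextPosition (p : Int) (sigar : String) : Int :=
  if PySem.Str.isIn "S" sigar || PySem.Str.isIn "H" sigar then -1
  else
    p + secondLoopA (sigar.toList.foldl stepA ([], [], [])).1
          (sigar.toList.foldl stepA ([], [], [])).2.1 - 1

-- ===== PORT B =====
-- B's single loop: state (totalLen, num_str); int() is still applied at every op char.
def stepB (acc : Int × List Char) (c : Char) : Int × List Char :=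
  if c ∈ ['M', 'I', 'D', 'S', 'H'] then
    let v := (PySem.Int.ofChars? acc.2).getD 0
    (if c = 'M' ∨ c = 'D' then acc.1 + v else acc.1, [])
  else
    (acc.1, acc.2 ++ [c])

def getNextPosition_alt (p : Int) (sigar : String) : Int :=
  if PySem.Str.isIn "S" sigar || PySem.Str.isIn "H" sigar then -1
  else
    p + (sigar.toList.foldl stepB (0, [])).1 - 1

-- ===== PRECONDITION & SPEC =====
-- The digit buffers standing before each op char, in order (the trailing buffer is never int()ed).
def pvBuffers (cs : List Char) : List (List Char) :=
  (cs.foldl (fun (acc : List (List Char) × List Char) c =>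
    if c ∈ ['M', 'I', 'D', 'S', 'H'] then (acc.1 ++ [acc.2], [])
    else (acc.1, acc.2 ++ [c])) ([], [])).1

-- Pre_ excludes exactly the inputs where Python A raises ValueError: no S/H (so the
-- first branch does not return -1) and some buffer before an op char is not int()-parsable.
def Pre_getNextPosition (p : Int) (sigar : String) : Prop :=
  (PySem.Str.isIn "S" sigar || PySem.Str.isIn "H" sigar) = true ∨
  ∀ seg ∈ pvBuffers sigar.toList, (PySem.Int.ofChars? seg).isSome = true

instance (p : Int) (sigar : String) : Decidable (Pre_getNextPosition p sigar) := by
  unfold Pre_getNextPosition; infer_instance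

def pvWitness_getNextPosition : Int × String := (5, "3M2D10I")

def Spec_getNextPosition (p : Int) (sigar : String) (out : Int) : Prop := out = getNextPosition_alt p sigar
instance (p : Int) (sigar : String) (out : Int) : Decidable (Spec_getNextPosition p sigar out) := by unfold Spec_getNextPosition; infer_instance

-- ===== CLAIM (what is proved, stated in full; the proofs are below) =====
def Claim_equal_getNextPosition : Prop := ∀ (p : Int) (sigar : String), Dom_getNextPosition p sigar → Pre_getNextPosition p sigar → Spec_getNextPosition p sigar (getNextPosition p sigar)

-- ===== LEMMAS AND PROOFS =====

-- Sum of nums entries at M/D positions, as a fold over the zipped pair.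
def zipTotal (s : List Char) (nums : List Int) : Int :=
  (s.zip nums).foldl (fun t cv => if cv.1 = 'M' ∨ cv.1 = 'D' then t + cv.2 else t) 0

theorem zipTotal_nil : zipTotal [] [] = 0 := rfl

theorem zipTotal_concat (s : List Char) (nums : List Int) (h : nums.length = s.length)
    (c : Char) (v : Int) :
    zipTotal (s ++ [c]) (nums ++ [v]) =
      (if c = 'M' ∨ c = 'D' then zipTotal s nums + v else zipTotal s nums) := by
  unfold zipTotal
  rw [List.zip_append h.symm, List.foldl_append]
  simp

-- A's second loop (index loop over range) computes zipTotal when lengths agree.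
theorem rangeLoop_eq_zipTotal (s : List Char) (nums : List Int) (h : nums.length = s.length) :
    secondLoopA s nums = zipTotal s nums := by
  unfold secondLoopA
  induction s using List.reverseRecOn generalizing nums with
  | nil =>
    have : nums = [] := List.eq_nil_of_length_eq_zero (by simpa using h)
    subst this; rfl
  | append_singleton s c ih =>
    rcases nums.eq_nil_or_concat' with rfl | ⟨ns, v, rfl⟩
    · simp at h
    · have hlen : ns.length = s.length := by simpa using h
      rw [List.length_append, List.length_cons, List.length_nil, List.range_succ,
        List.foldl_append]
      have hcongr : (List.range s.length).foldl
          (fun t x => if (s ++ [c]).getD x ' ' = 'M' ∨ (s ++ [c]).getD x ' ' = 'D'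
            then t + (ns ++ [v]).getD x 0 else t) 0
          = (List.range s.length).foldl
          (fun t x => if s.getD x ' ' = 'M' ∨ s.getD x ' ' = 'D'
            then t + ns.getD x 0 else t) 0 := by
        apply PySem.List.foldl_congr_mem
        intro t x hx
        have hxs : x < s.length := List.mem_range.mp hx
        have hxn : x < ns.length := hlen ▸ hxs
        rw [List.getD_append _ _ _ _ hxs, List.getD_append _ _ _ _ hxn]
      rw [hcongr, ih ns hlen, zipTotal_concat s ns hlen c v]
      have hgs : (s ++ [c]).getD s.length ' ' = c := by
        rw [List.getD_eq_getElem?_getD]; simp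
      have hgn : (ns ++ [v]).getD s.length 0 = v := by
        rw [List.getD_eq_getElem?_getD, ← hlen]; simp
      rw [List.foldl_cons, List.foldl_nil, hgs, hgn]

-- Main invariant: B's fold carries zipTotal of A's fold state, and the buffers agree.
theorem fold_invariant (cs : List Char) (s : List Char) (nums : List Int) (num : List Char)
    (h : nums.length = s.length) :
    cs.foldl stepB (zipTotal s nums, num)
      = (zipTotal (cs.foldl stepA (s, nums, num)).1 (cs.foldl stepA (s, nums, num)).2.1,
         (cs.foldl stepA (s, nums, num)).2.2)
    ∧ (cs.foldl stepA (s, nums, num)).2.1.length = (cs.foldl stepA (s, nums, num)).1.length := by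
  induction cs generalizing s nums num with
  | nil => exact ⟨rfl, h⟩
  | cons c cs ih =>
    rw [List.foldl_cons, List.foldl_cons]
    by_cases hc : c ∈ ['M', 'I', 'D', 'S', 'H']
    · have hA : stepA (s, nums, num) c
          = (s ++ [c], nums ++ [(PySem.Int.ofChars? num).getD 0], []) := by
        simp [stepA, hc]
      have hB : stepB (zipTotal s nums, num) c
          = (zipTotal (s ++ [c]) (nums ++ [(PySem.Int.ofChars? num).getD 0]), []) := by
        simp [stepB, hc, zipTotal_concat s nums h]
      rw [hA, hB]
      exact ih _ _ _ (by simp [h])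
    · have hA : stepA (s, nums, num) c = (s, nums, num ++ [c]) := by simp [stepA, hc]
      have hB : stepB (zipTotal s nums, num) c = (zipTotal s nums, num ++ [c]) := by
        simp [stepB, hc]
      rw [hA, hB]
      exact ih _ _ _ h

-- ===== VERDICT (by name: the statement is the Claim_ definition above) =====
theorem getNextPosition_spec : Claim_equal_getNextPosition := by
  intro p sigar _ _
  unfold Spec_getNextPosition getNextPosition getNextPosition_alt
  by_cases hg : (PySem.Str.isIn "S" sigar || PySem.Str.isIn "H" sigar) = true
  · rw [if_pos hg, if_pos hg]
  · rw [if_neg hg, if_neg hg]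
    have inv := fold_invariant sigar.toList [] [] [] rfl
    rw [zipTotal_nil] at inv
    rw [rangeLoop_eq_zipTotal _ _ inv.2, inv.1]
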